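-- pv_equiv track=rewrite | github.com/procrastinatingVariable/TSS_GAUIO | testing.py | split_group
-- ===== SOURCE A (Python) =====
-- def split_group(trans_func, group, dister):
--     interpart = {}
--     for state in group:
--         try:
--             out = trans_func[state][dister]
--             if out in interpart :
--                 interpart[out].append(state)
--             else :
--                 interpart[out] = [state]
--         except:
--             pass
--
--     return list(interpart.values())
-- ===== SOURCE B (Python) =====
-- def split_group(trans_func, group, dister):
--     # Two-pass: collect (out, state) pairs (skipping failed lookups) and the
--     # distinct outputs in first-occurrence order, then filter once per output.
--     pairs = []
--     order = []
--     for state in group: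
--         try:
--             out = trans_func[state][dister]
--         except:
--             continue
--         pairs.append((out, state))
--         if out not in order:
--             order.append(out)
--     return [[s for (o, s) in pairs if o == out] for out in order]
-- ===== Notes on version B (the rewrite author's own statement) =====
-- stated objective: alternative
-- what changed: Replaces the single-pass dict-of-lists grouping with a two-pass scheme: first collect valid (out, state) pairs plus the distinct outputs in first-occurrence order, then build each group by filtering the pair list per output.
import Mathlib
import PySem

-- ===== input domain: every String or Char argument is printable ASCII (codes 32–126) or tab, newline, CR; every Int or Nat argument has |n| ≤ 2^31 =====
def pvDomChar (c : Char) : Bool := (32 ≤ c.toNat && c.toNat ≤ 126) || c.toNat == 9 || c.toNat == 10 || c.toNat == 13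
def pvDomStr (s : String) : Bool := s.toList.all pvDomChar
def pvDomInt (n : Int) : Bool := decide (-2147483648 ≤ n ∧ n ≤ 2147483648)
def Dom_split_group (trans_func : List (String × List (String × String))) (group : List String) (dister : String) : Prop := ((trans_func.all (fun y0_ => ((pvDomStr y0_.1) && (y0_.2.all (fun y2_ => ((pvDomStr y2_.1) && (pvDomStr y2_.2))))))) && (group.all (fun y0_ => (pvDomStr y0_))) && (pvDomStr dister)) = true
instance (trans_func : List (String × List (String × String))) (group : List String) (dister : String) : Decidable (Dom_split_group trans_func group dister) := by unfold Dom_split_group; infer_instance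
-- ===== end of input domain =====

-- B replaces A's single-pass dict-of-lists grouping with two passes (pair list +
-- ordered distinct outputs, then a filter per output); objective: alternative decomposition.

-- ===== PORT A =====
-- literal transliteration of A: dict interpart built in one pass, then list(interpart.values())
def split_group (trans_func : List (String × List (String × String))) (group : List String) (dister : String) : List (List String) :=
  (group.foldl (fun (interpart : PySem.Dict String (List String)) state =>
      match trans_func.lookup state with          -- trans_func[state]; KeyError → except: pass
      | none => interpart
      | some inner =>
        match inner.lookup dister with            -- [dister]; KeyError → except: pass
        | none => interpart
        | some out =>
          if interpart.contains out then interpart.modify out [] (fun l => l ++ [state])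
          else interpart.insert out [state])
    PySem.Dict.empty).values

-- ===== PORT B =====
-- helper of B: the try/except lookup, none = skipped state
def pvLookup (trans_func : List (String × List (String × String))) (dister : String) (state : String) : Option (String × String) :=
  match trans_func.lookup state with
  | none => none
  | some inner =>
    match inner.lookup dister with
    | none => none
    | some out => some (out, state)

def split_group_alt (trans_func : List (String × List (String × String))) (group : List String) (dister : String) : List (List String) :=
  let pairs := group.filterMap (pvLookup trans_func dister)
  let order := PySem.Set.ofList (pairs.map (fun p => p.1))
  order.map (fun out => (pairs.filter (fun p => p.1 == out)).map (fun p => p.2))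

-- ===== PRECONDITION & SPEC =====
def Spec_split_group (trans_func : List (String × List (String × String))) (group : List String) (dister : String) (out : List (List String)) : Prop := out = split_group_alt trans_func group dister
instance (trans_func : List (String × List (String × String))) (group : List String) (dister : String) (out : List (List String)) : Decidable (Spec_split_group trans_func group dister out) := by unfold Spec_split_group; infer_instance

-- ===== CLAIM (what is proved, stated in full; the proofs are below) =====
def Claim_equal_split_group : Prop := ∀ (trans_func : List (String × List (String × String))) (group : List String) (dister : String), Dom_split_group trans_func group dister → Spec_split_group trans_func group dister (split_group trans_func group dister)

-- ===== LEMMAS AND PROOFS =====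

-- A's loop body is exactly 'modify key [] (· ++ [state])' on the pvLookup result
theorem pv_stepA_eq (trans_func : List (String × List (String × String))) (dister : String)
    (d : PySem.Dict String (List String)) (state : String) :
    (match trans_func.lookup state with
     | none => d
     | some inner =>
       match inner.lookup dister with
       | none => d
       | some out =>
         if d.contains out then d.modify out [] (fun l => l ++ [state])
         else d.insert out [state])
    = match pvLookup trans_func dister state with
      | none => d
      | some p => d.modify p.1 [] (fun x => x ++ [p.2]) := by
  cases h1 : trans_func.lookup state with
  | none => simp [pvLookup, h1]
  | some inner =>
    cases h2 : inner.lookup dister with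
    | none => simp [pvLookup, h1, h2]
    | some out =>
      by_cases h : d.contains out = true
      · simp [pvLookup, h1, h2, h]
      · simp only [Bool.not_eq_true] at h
        simp [pvLookup, h1, h2, h, PySem.Dict.modify, PySem.Dict.getD_of_not_contains d [] h]

-- skipping none-results commutes the fold with filterMap
theorem pv_foldl_filterMap (g : String → Option (String × String)) :
    ∀ (l : List String) (d : PySem.Dict String (List String)),
      l.foldl (fun d x => match g x with
                          | none => d
                          | some p => d.modify p.1 [] (fun x => x ++ [p.2])) d
        = (l.filterMap g).foldl (fun d p => d.modify p.1 [] (fun x => x ++ [p.2])) d := by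
  intro l
  induction l with
  | nil => intro d; rfl
  | cons x t ih =>
    intro d
    cases h : g x <;> simp [h, ih]

-- ===== VERDICT (by name: the statement is the Claim_ definition above) =====
theorem split_group_spec : Claim_equal_split_group := by
  intro trans_func group dister _
  unfold Spec_split_group split_group split_group_alt
  have hstep : (fun (interpart : PySem.Dict String (List String)) state =>
      match trans_func.lookup state with
      | none => interpart
      | some inner =>
        match inner.lookup dister with
        | none => interpart
        | some out =>
          if interpart.contains out then interpart.modify out [] (fun l => l ++ [state])
          else interpart.insert out [state])
    = (fun (d : PySem.Dict String (List String)) state =>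
        match pvLookup trans_func dister state with
        | none => d
        | some p => d.modify p.1 [] (fun x => x ++ [p.2])) := by
    funext d s; exact pv_stepA_eq trans_func dister d s
  rw [hstep, pv_foldl_filterMap (pvLookup trans_func dister)]
  set pairs := group.filterMap (pvLookup trans_func dister) with hp
  have hnd : (pairs.foldl (fun d p => d.modify p.1 [] (fun x => x ++ [p.2])) PySem.Dict.empty).keys.Nodup :=
    PySem.Dict.nodup_keys_foldl_modify_key pairs (fun p => p.1) []
      (fun _ p => (fun x => x ++ [p.2])) PySem.Dict.empty (by simp [PySem.Dict.keys_empty])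
  rw [PySem.Dict.values_eq_map_keys _ hnd []]
  have hkeys := PySem.Dict.keys_foldl_modify_key pairs (fun p => p.1) []
      (fun _ p => (fun x => x ++ [p.2])) PySem.Dict.empty
  simp only [hkeys, PySem.Dict.keys_empty, PySem.Set.update_nil_left]
  have hgetD := fun c => PySem.Dict.getD_foldl_modify_append pairs PySem.Dict.empty c
  simp only [hgetD, PySem.Dict.getD_empty, List.nil_append]
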